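-- pv_equiv track=rewrite | github.com/SireneNova/Portfolio | Python/Version3+/Codility/x16-Triangle.py | trianglesort
-- ===== SOURCE A (Python) =====
-- def trianglesort(A):
--     length = len(A)
--     B = [0] * length
--     for i in range(length):
--         if i%2 == 0:
--             B[int(length-1-i/2)]=A[i]
--         elif (i+1)%2 == 0:
--             B[int((i+1)/2-1)] = A[i]
--     return B
-- ===== SOURCE B (Python) =====
-- def trianglesort(A):
--     odds = []
--     evens = []
--     toggle = False
--     for x in A:
--         if toggle:
--             odds.append(x)
--         else:
--             evens.append(x)
--         toggle = not toggle
--     return odds + evens[::-1]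
-- ===== Notes on version B (the rewrite author's own statement) =====
-- stated objective: simpler
-- what changed: A computes a target index for every element and writes into a preallocated array; B makes one pass splitting the list into odd-indexed and even-indexed subsequences and returns odds + reversed(evens), with no index arithmetic.
import Mathlib
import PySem

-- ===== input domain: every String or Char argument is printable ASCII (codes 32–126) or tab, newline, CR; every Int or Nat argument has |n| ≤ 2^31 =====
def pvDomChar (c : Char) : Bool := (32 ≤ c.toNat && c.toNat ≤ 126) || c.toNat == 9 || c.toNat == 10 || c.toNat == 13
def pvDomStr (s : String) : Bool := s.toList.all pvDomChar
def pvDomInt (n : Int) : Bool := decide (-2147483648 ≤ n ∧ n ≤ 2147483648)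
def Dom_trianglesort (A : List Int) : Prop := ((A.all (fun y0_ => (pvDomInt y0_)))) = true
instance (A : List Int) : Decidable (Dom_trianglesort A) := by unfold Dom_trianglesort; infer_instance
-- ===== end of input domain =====

-- B replaces A's per-element target-index arithmetic by a one-pass split into the
-- odd-indexed and even-indexed subsequences, returning odds ++ reverse(evens) (objective: simpler).

-- ===== PORT A =====
-- Python's `int(length-1-i/2)` / `int((i+1)/2-1)` use float division, but in the branch where
-- each is evaluated its numerator is even, so `int(…/2)` equals floor division exactly.
def trianglesort (A : List Int) : List Int :=
  (PySem.List.pyRange 0 (A.length : Int) 1).foldl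
    (fun B i =>
      if PySem.Int.mod i 2 == 0 then
        PySem.List.pySetD B ((A.length : Int) - 1 - PySem.Int.floordiv i 2) (PySem.List.pyGetD A i 0)
      else if PySem.Int.mod (i + 1) 2 == 0 then
        PySem.List.pySetD B (PySem.Int.floordiv (i + 1) 2 - 1) (PySem.List.pyGetD A i 0)
      else B)
    (List.replicate A.length 0)

-- ===== PORT B =====
def trianglesort_alt (A : List Int) : List Int :=
  let r : List Int × List Int × Bool :=
    A.foldl
      (fun st x =>
        if st.2.2 then (st.1 ++ [x], st.2.1, !st.2.2)
        else (st.1, st.2.1 ++ [x], !st.2.2))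
      ([], [], false)
  r.1 ++ r.2.1.reverse

-- ===== PRECONDITION & SPEC =====
def Spec_trianglesort (A : List Int) (out : List Int) : Prop := out = trianglesort_alt A
instance (A : List Int) (out : List Int) : Decidable (Spec_trianglesort A out) := by unfold Spec_trianglesort; infer_instance

-- ===== CLAIM (what is proved, stated in full; the proofs are below) =====
def Claim_equal_trianglesort : Prop := ∀ (A : List Int), Dom_trianglesort A → Spec_trianglesort A (trianglesort A)

-- ===== LEMMAS AND PROOFS =====

-- (odd-position elements, even-position elements) of a list
def pairOE : List Int → List Int × List Int
  | [] => ([], [])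
  | a :: l => ((pairOE l).2, a :: (pairOE l).1)

-- writer: the source index of A that ends up at position j of the output, for output length L
def wIdx (L j : Nat) : Nat := if j < L / 2 then 2 * j + 1 else 2 * (L - 1 - j)

lemma pairOE_length : ∀ l : List Int,
    (pairOE l).1.length = l.length / 2 ∧ (pairOE l).2.length = (l.length + 1) / 2 := by
  intro l
  induction l with
  | nil => simp [pairOE]
  | cons a l ih =>
    refine ⟨?_, ?_⟩
    · show (pairOE l).2.length = (a :: l).length / 2
      rw [ih.2]; simp only [List.length_cons]
    · show (a :: (pairOE l).1).length = ((a :: l).length + 1) / 2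
      rw [List.length_cons, ih.1]; simp only [List.length_cons]; omega

lemma pairOE_get : ∀ l : List Int, ∀ j : Nat,
    (pairOE l).1[j]? = l[2 * j + 1]? ∧ (pairOE l).2[j]? = l[2 * j]? := by
  intro l
  induction l with
  | nil => intro j; simp [pairOE]
  | cons a l ih =>
    intro j
    refine ⟨?_, ?_⟩
    · show (pairOE l).2[j]? = (a :: l)[2 * j + 1]?
      rw [(ih j).2]
      simp
    · show (a :: (pairOE l).1)[j]? = (a :: l)[2 * j]?
      cases j with
      | zero => simp
      | succ j =>
        have h2 : 2 * (j + 1) = (2 * j + 1) + 1 := by omega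
        rw [h2]
        simpa using (ih j).1

lemma foldl_toggle : ∀ (l : List Int) (o e : List Int),
    (∃ t', l.foldl
        (fun (st : List Int × List Int × Bool) x =>
          if st.2.2 then (st.1 ++ [x], st.2.1, !st.2.2)
          else (st.1, st.2.1 ++ [x], !st.2.2))
        (o, e, false)
      = (o ++ (pairOE l).1, e ++ (pairOE l).2, t'))
    ∧ (∃ t', l.foldl
        (fun (st : List Int × List Int × Bool) x =>
          if st.2.2 then (st.1 ++ [x], st.2.1, !st.2.2)
          else (st.1, st.2.1 ++ [x], !st.2.2))
        (o, e, true)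
      = (o ++ (pairOE l).2, e ++ (pairOE l).1, t')) := by
  intro l
  induction l with
  | nil => intro o e; exact ⟨⟨false, by simp [pairOE]⟩, ⟨true, by simp [pairOE]⟩⟩
  | cons a l ih =>
    intro o e
    constructor
    · obtain ⟨t', ht⟩ := (ih o (e ++ [a])).2
      exact ⟨t', by simpa [pairOE, List.append_assoc] using ht⟩
    · obtain ⟨t', ht⟩ := (ih (o ++ [a]) e).1
      exact ⟨t', by simpa [pairOE, List.append_assoc] using ht⟩

lemma alt_eq_pairOE (A : List Int) :
    trianglesort_alt A = (pairOE A).1 ++ (pairOE A).2.reverse := by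
  obtain ⟨t', ht⟩ := (foldl_toggle A [] []).1
  unfold trianglesort_alt
  rw [ht]
  simp

lemma wIdx_lt (L j : Nat) (hj : j < L) : wIdx L j < L := by
  unfold wIdx; split <;> omega

lemma alt_get (A : List Int) (j : Nat) (hj : j < A.length) :
    (trianglesort_alt A)[j]? = A[wIdx A.length j]? := by
  rw [alt_eq_pairOE]
  have hl := pairOE_length A
  by_cases h : j < A.length / 2
  · rw [List.getElem?_append_left (by omega)]
    rw [(pairOE_get A j).1]
    unfold wIdx
    rw [if_pos h]
  · have hj1 : (pairOE A).1.length ≤ j := by omega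
    rw [List.getElem?_append_right hj1]
    have hlt : j - (pairOE A).1.length < (pairOE A).2.length := by omega
    rw [List.getElem?_reverse hlt]
    rw [(pairOE_get A _).2]
    unfold wIdx
    rw [if_neg h]
    congr 1
    omega

lemma alt_length (A : List Int) : (trianglesort_alt A).length = A.length := by
  rw [alt_eq_pairOE]
  have hl := pairOE_length A
  simp [hl.1, hl.2]
  omega

-- the A-side loop over range n, in Nat form
def loopA (A : List Int) (n : Nat) : List Int :=
  (List.range n).foldl
    (fun B k =>
      if k % 2 = 0 then B.set (A.length - 1 - k / 2) (A.getD k 0)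
      else B.set ((k + 1) / 2 - 1) (A.getD k 0))
    (List.replicate A.length 0)

lemma loopA_length (A : List Int) (n : Nat) : (loopA A n).length = A.length := by
  unfold loopA
  induction n with
  | zero => simp
  | succ n ih =>
    rw [List.range_succ, List.foldl_append]
    simp only [List.foldl_cons, List.foldl_nil]
    split <;> (rw [List.length_set]; exact ih)

lemma trianglesort_eq_loopA (A : List Int) : trianglesort A = loopA A A.length := by
  unfold trianglesort loopA
  rw [PySem.List.pyRange_one, List.foldl_map]
  simp only [Int.sub_zero, Int.toNat_natCast]
  apply PySem.List.foldl_congr_mem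
  intro B k hk
  have hk' : k < A.length := List.mem_range.mp hk
  simp only [zero_add]
  have hm : PySem.Int.mod (k : Int) 2 = ((k % 2 : Nat) : Int) := by
    exact_mod_cast PySem.Int.mod_natCast k 2
  have hm1 : PySem.Int.mod ((k : Int) + 1) 2 = (((k + 1) % 2 : Nat) : Int) := by
    rw [show ((k : Int)) + 1 = (((k + 1 : Nat)) : Int) by push_cast; ring]
    exact_mod_cast PySem.Int.mod_natCast (k + 1) 2
  have hd : PySem.Int.floordiv (k : Int) 2 = ((k / 2 : Nat) : Int) := by
    exact_mod_cast PySem.Int.floordiv_natCast k 2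
  have hd1 : PySem.Int.floordiv ((k : Int) + 1) 2 = (((k + 1) / 2 : Nat) : Int) := by
    rw [show ((k : Int)) + 1 = (((k + 1 : Nat)) : Int) by push_cast; ring]
    exact_mod_cast PySem.Int.floordiv_natCast (k + 1) 2
  rw [hm]
  by_cases hpar : k % 2 = 0
  · rw [if_pos (by simp [hpar]), if_pos hpar]
    rw [hd, PySem.List.pyGetD_natCast]
    rw [show ((A.length : Int) - 1 - ((k / 2 : Nat) : Int)) = ((A.length - 1 - k / 2 : Nat) : Int) by push_cast; omega]
    rw [PySem.List.pySetD_natCast]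
  · rw [if_neg (by simp only [beq_iff_eq]; omega), hm1, if_pos (by simp only [beq_iff_eq]; omega), if_neg hpar]
    rw [hd1, PySem.List.pyGetD_natCast]
    rw [show (((k + 1) / 2 : Nat) : Int) - 1 = (((k + 1) / 2 - 1 : Nat) : Int) by omega]
    rw [PySem.List.pySetD_natCast]

lemma loopA_get (A : List Int) : ∀ n, n ≤ A.length → ∀ j, j < A.length →
    (loopA A n)[j]? = if wIdx A.length j < n then A[wIdx A.length j]? else some 0 := by
  intro n
  induction n with
  | zero =>
    intro _ j hj
    rw [if_neg (by omega)]
    unfold loopA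
    simp [hj]
  | succ n ih =>
    intro hn j hj
    have hlen := loopA_length A n
    have hstep : loopA A (n + 1) =
        (if n % 2 = 0 then (loopA A n).set (A.length - 1 - n / 2) (A.getD n 0)
         else (loopA A n).set ((n + 1) / 2 - 1) (A.getD n 0)) := by
      unfold loopA
      rw [List.range_succ, List.foldl_append]
      simp
    set i : Nat := if n % 2 = 0 then A.length - 1 - n / 2 else (n + 1) / 2 - 1 with hi
    have hstep' : loopA A (n + 1) = (loopA A n).set i (A.getD n 0) := by
      rw [hstep, hi]; split <;> rfl
    have hiA : i < A.length := by rw [hi]; split <;> omega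
    have hwi : wIdx A.length i = n := by
      unfold wIdx
      by_cases hev : n % 2 = 0
      · rw [hi, if_pos hev]
        rw [if_neg (by omega)]
        omega
      · rw [hi, if_neg hev]
        rw [if_pos (by omega)]
        omega
    have huniq : ∀ j', j' < A.length → wIdx A.length j' = n → j' = i := by
      intro j' hj' hw
      unfold wIdx at hw
      by_cases hev : n % 2 = 0
      · rw [hi, if_pos hev]
        split at hw <;> omega
      · rw [hi, if_neg hev]
        split at hw <;> omega
    rw [hstep']
    by_cases hji : j = i
    · subst hji
      rw [List.getElem?_set_self (by omega)]
      rw [if_pos (by omega), hwi]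
      rw [List.getElem?_eq_getElem (show n < A.length by omega)]
      simp [List.getD, List.getElem?_eq_getElem (show n < A.length by omega)]
    · rw [List.getElem?_set_ne (fun h => hji h.symm)]
      rw [ih (by omega) j hj]
      have hiff : wIdx A.length j < n + 1 ↔ wIdx A.length j < n := by
        constructor
        · intro h
          rcases Nat.lt_or_ge (wIdx A.length j) n with h' | h'
          · exact h'
          · exact absurd (huniq j hj (by omega)) hji
        · omega
      rw [if_congr hiff rfl rfl]

-- ===== VERDICT (by name: the statement is the Claim_ definition above) =====
theorem trianglesort_spec : Claim_equal_trianglesort := by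
  intro A _
  unfold Spec_trianglesort
  rw [trianglesort_eq_loopA]
  apply List.ext_getElem?
  intro j
  by_cases hj : j < A.length
  · rw [loopA_get A A.length (le_refl _) j hj]
    rw [if_pos (wIdx_lt A.length j hj)]
    rw [alt_get A j hj]
  · rw [List.getElem?_eq_none (by rw [loopA_length]; omega)]
    rw [List.getElem?_eq_none (by rw [alt_length]; omega)]
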